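-- pv_equiv track=rewrite | github.com/Bobcatsoap/jy-server | cell/RoomType13Calculator.py | find_continuous_double
-- ===== SOURCE A (Python) =====
-- def _find_double_all(card):
--     """
--     找到所有含有对的牌
--     """
--     item_list = []
--     for v in card:
--         if card.count(v) >= 2 and v not in item_list:
--             item_list.append(v)
--     item_list.sort()
--     return item_list
--
-- def find_continuous_double(card1, card2, room_info):
--     """
--     找大于指定牌的连对
--     """
--     cards_01 = distinct_number_list(card1)
--     cards_02 = _find_double_all(card2)
--     if len(cards_02) < len(cards_01):
--         return []
--     itm_cards = []
--     index = 0
--     length = len(cards_01)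
--     while index + length <= len(cards_02):
--         itm_cards_00 = cards_02[index:index + length]
--         if itm_cards_00[-1] != 15 and itm_cards_00[-1] > cards_01[-1]:
--             if itm_cards_00[0] + len(itm_cards_00) - 1 == itm_cards_00[-1]:
--                 itm_cards.append(itm_cards_00 + itm_cards_00)
--         index += 1
--     return itm_cards
--
-- def distinct_number_list(card):
--     item_list = []
--     for v in card:
--         if card.count(v) == 1:
--             item_list.append(v)
--         else:
--             if v not in item_list:
--                 item_list.append(v)
--     item_list.sort()
--     return item_list
-- ===== SOURCE B (Python) =====
-- def find_continuous_double(card1, card2, room_info):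
--     """
--     找大于指定牌的连对
--     """
--     counts = {}
--     for v in card2:
--         counts[v] = counts.get(v, 0) + 1
--     pairs = sorted(v for v, c in counts.items() if c >= 2)
--     length = len(set(card1))
--     top = max(card1)
--     result = []
--     i = 0
--     n = len(pairs)
--     while i < n:
--         j = i
--         while j + 1 < n and pairs[j + 1] == pairs[j] + 1:
--             j += 1
--         # maximal consecutive run pairs[i..j]; emit every window ending inside it
--         for last in range(max(pairs[i] + length - 1, top + 1), pairs[j] + 1):
--             if last != 15:
--                 w = list(range(last - length + 1, last + 1))
--                 result.append(w + w)
--         i = j + 1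
--     return result
-- ===== Notes on version B (the rewrite author's own statement) =====
-- stated objective: faster
-- what changed: B counts card2 with a one-pass dict (no quadratic list.count scans), sorts the distinct pair values once, then instead of sliding a fixed-length window over them it segments the sorted values into maximal runs of consecutive integers with a two-pointer scan and emits, per run, all qualifying windows purely arithmetically (one range over admissible last values), never slicing or re-checking contiguity per start index.
import Mathlib
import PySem

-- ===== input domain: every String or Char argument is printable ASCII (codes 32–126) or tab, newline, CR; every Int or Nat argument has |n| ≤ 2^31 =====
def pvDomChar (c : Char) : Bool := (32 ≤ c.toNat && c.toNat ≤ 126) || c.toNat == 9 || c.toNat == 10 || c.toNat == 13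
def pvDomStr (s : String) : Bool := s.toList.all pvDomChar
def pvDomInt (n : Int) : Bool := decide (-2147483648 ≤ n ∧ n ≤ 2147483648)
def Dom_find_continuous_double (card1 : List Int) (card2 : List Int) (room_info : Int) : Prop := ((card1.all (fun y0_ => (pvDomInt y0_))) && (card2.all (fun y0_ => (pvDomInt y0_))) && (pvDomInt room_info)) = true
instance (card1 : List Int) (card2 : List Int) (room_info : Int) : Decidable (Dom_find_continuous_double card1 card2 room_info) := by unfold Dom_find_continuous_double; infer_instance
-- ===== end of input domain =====

-- B counts card2 with a one-pass dict, sorts the distinct pair values once, segments them into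
-- maximal consecutive runs with a two-pointer scan and emits each run's qualifying windows
-- arithmetically, instead of A's quadratic count scans plus a fixed-length sliding window.

-- ===== PORT A =====
-- _find_double_all: collect values occurring ≥ 2 times, dedup in first-occurrence order, sort
def pvFindDoubleAll (card : List Int) : List Int :=
  PySem.List.sorted
    (card.foldl (fun acc v => if 2 ≤ PySem.List.count card v ∧ v ∉ acc then acc ++ [v] else acc) [])
    (fun x => x) false

-- distinct_number_list: dedup in first-occurrence order (count==1 appends unconditionally), sort
def pvDistinctNumberList (card : List Int) : List Int :=
  PySem.List.sorted
    (card.foldl (fun acc v =>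
      if PySem.List.count card v = 1 then acc ++ [v]
      else if v ∉ acc then acc ++ [v] else acc) [])
    (fun x => x) false

-- the while loop of find_continuous_double; the 'none' match arms are Python's IndexError
-- (itm_cards_00[-1] / cards_01[-1] on an empty list), reachable only when card1 = [] (outside Pre_)
def pvALoop (cards01 cards02 : List Int) (length : Nat) (index : Nat) (acc : List (List Int)) :
    List (List Int) :=
  if _h : index + length ≤ cards02.length then
    let itm := PySem.List.slice cards02 (some (index : Int)) (some ((index : Int) + (length : Int)))
    match PySem.List.pyGet? itm (-1), PySem.List.pyGet? cards01 (-1) with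
    | some wl, some c1l =>
        let acc' :=
          if wl ≠ 15 ∧ c1l < wl then
            match PySem.List.pyGet? itm 0 with
            | some w0 => if w0 + (itm.length : Int) - 1 = wl then acc ++ [itm ++ itm] else acc
            | none => acc
          else acc
        pvALoop cards01 cards02 length (index + 1) acc'
    | _, _ => acc
  else acc
termination_by cards02.length + 1 - index
decreasing_by omega

def find_continuous_double (card1 : List Int) (card2 : List Int) (room_info : Int) :
    List (List Int) :=
  let cards01 := pvDistinctNumberList card1
  let cards02 := pvFindDoubleAll card2
  if cards02.length < cards01.length then []
  else pvALoop cards01 cards02 cards01.length 0 []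

-- ===== PORT B =====
-- inner while: advance j while pairs[j+1] == pairs[j] + 1 (the guard keeps both indices in range,
-- so plain List.getD is exact for Python's pairs[j+1] / pairs[j] here)
def pvRunEnd (pairs : List Int) (j : Nat) : Nat :=
  if _h : j + 1 < pairs.length ∧ pairs.getD (j + 1) 0 = pairs.getD j 0 + 1 then
    pvRunEnd pairs (j + 1)
  else j
termination_by pairs.length - j
decreasing_by omega

-- the inner for: last over range(max(lo, top+1), hi+1), appending the doubled window unless last == 15
def pvEmit (L : Nat) (top lo hi : Int) (res : List (List Int)) : List (List Int) :=
  (PySem.List.pyRange (max lo (top + 1)) (hi + 1) 1).foldl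
    (fun r last =>
      if last ≠ 15 then
        let w := PySem.List.pyRange (last - (L : Int) + 1) (last + 1) 1
        r ++ [w ++ w]
      else r) res

-- lemma cited by pvOuter's decreasing_by
theorem pvRunEnd_ge (pairs : List Int) (j : Nat) : j ≤ pvRunEnd pairs j := by
  rw [pvRunEnd]
  split
  · exact le_trans (by omega) (pvRunEnd_ge pairs (j + 1))
  · exact le_refl j
termination_by pairs.length - j
decreasing_by omega

-- outer while over run starts i (pairs[i], pairs[j] are in range: i < n and i ≤ j < n)
def pvOuter (pairs : List Int) (L : Nat) (top : Int) (i : Nat) (res : List (List Int)) :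
    List (List Int) :=
  if _h : i < pairs.length then
    let j := pvRunEnd pairs i
    pvOuter pairs L top (j + 1)
      (pvEmit L top (pairs.getD i 0 + (L : Int) - 1) (pairs.getD j 0) res)
  else res
termination_by pairs.length - i
decreasing_by have := pvRunEnd_ge pairs i; omega

def find_continuous_double_alt (card1 : List Int) (card2 : List Int) (room_info : Int) :
    List (List Int) :=
  let counts := card2.foldl (fun d v => d.modify v 0 (· + 1)) (PySem.Dict.empty : PySem.Dict Int Int)
  let pairs := PySem.List.sorted
    ((counts.items.filter (fun p => (2:Int) ≤ p.2)).map Prod.fst) (fun x => x) false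
  let length := (PySem.Set.ofList card1).length
  match PySem.List.max? card1 (fun x => x) with
  | none => []   -- Python: max([]) raises ValueError, excluded by Pre_
  | some top => pvOuter pairs length top 0 []

-- ===== PRECONDITION & SPEC =====
-- Pre_ excludes card1 = [], on which A raises IndexError (cards_01[-1]) and B raises ValueError (max([])).
def Pre_find_continuous_double (card1 : List Int) (card2 : List Int) (room_info : Int) : Prop :=
  card1 ≠ []
instance (card1 : List Int) (card2 : List Int) (room_info : Int) :
    Decidable (Pre_find_continuous_double card1 card2 room_info) := by
  unfold Pre_find_continuous_double; infer_instance

def pvWitness_find_continuous_double : List Int × List Int × Int := ([3], [4, 4, 5, 5], 0)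

def Spec_find_continuous_double (card1 : List Int) (card2 : List Int) (room_info : Int)
    (out : List (List Int)) : Prop := out = find_continuous_double_alt card1 card2 room_info
instance (card1 : List Int) (card2 : List Int) (room_info : Int) (out : List (List Int)) :
    Decidable (Spec_find_continuous_double card1 card2 room_info out) := by
  unfold Spec_find_continuous_double; infer_instance

-- ===== CLAIM (what is proved, stated in full; the proofs are below) =====
def Claim_equal_find_continuous_double : Prop := ∀ (card1 : List Int) (card2 : List Int) (room_info : Int), Dom_find_continuous_double card1 card2 room_info → Pre_find_continuous_double card1 card2 room_info → Spec_find_continuous_double card1 card2 room_info (find_continuous_double card1 card2 room_info)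

-- ===== LEMMAS AND PROOFS =====

-- the common normal form of A's cards_02 and B's pairs: the sorted distinct values with count ≥ 2
def pvPairs (card : List Int) : List Int :=
  PySem.List.sorted ((PySem.Set.ofList card).filter (fun v => decide (2 ≤ PySem.List.count card v)))
    (fun x => x) false

-- one step of a fixed-length sliding window over pairs, common intermediate form of both programs
def pvBStep (pairs : List Int) (length : Nat) (top : Int) (res : List (List Int)) (s : Int) :
    List (List Int) :=
  let last := PySem.List.pyGetD pairs (s + (length : Int) - 1) 0
  if last ≠ 15 ∧ top < last ∧ last - PySem.List.pyGetD pairs s 0 = (length : Int) - 1 then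
    let win := PySem.List.pyRange (last - (length : Int) + 1) (last + 1) 1
    res ++ [win ++ win]
  else res

theorem fda_inner (card : List Int) :
    card.foldl (fun acc v => if 2 ≤ PySem.List.count card v ∧ v ∉ acc then acc ++ [v] else acc) []
      = PySem.Set.ofList (card.filter (fun v => decide (2 ≤ PySem.List.count card v))) := by
  rw [PySem.List.foldl_congr_mem card _
      (fun acc v => if 2 ≤ PySem.List.count card v then PySem.Set.add acc v else acc) []
      (by
        intro acc v _
        simp only [PySem.List.count_eq]
        by_cases h1 : 2 ≤ List.count v card
        · by_cases h2 : v ∈ acc <;>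
            simp [h1, h2, PySem.Set.add, PySem.Set.contains]
        · simp [h1])]
  rw [PySem.List.foldl_ite_eq_foldl_filter, ← PySem.Set.ofList_eq_foldl]

theorem fda_eq (card : List Int) :
    PySem.List.sorted
      (card.foldl (fun acc v => if 2 ≤ PySem.List.count card v ∧ v ∉ acc then acc ++ [v] else acc) [])
      (fun x => x) false = pvPairs card := by
  rw [fda_inner]
  exact PySem.List.sorted_eq_sorted_of_perm _ _ _ (fun a b h => h)
    ((List.perm_ext_iff_of_nodup (PySem.Set.nodup_ofList _)
      ((PySem.Set.nodup_ofList card).filter _)).mpr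
      (by intro x; simp [PySem.Set.mem_ofList, List.mem_filter]))

theorem bpairs_eq (card : List Int) :
    PySem.List.sorted
      (((card.foldl (fun d v => d.modify v 0 (· + 1)) (PySem.Dict.empty : PySem.Dict Int Int)).items.filter
          (fun p => (2:Int) ≤ p.2)).map Prod.fst) (fun x => x) false = pvPairs card := by
  have hc : card.foldl (fun d v => d.modify v 0 (· + 1)) (PySem.Dict.empty : PySem.Dict Int Int)
      = PySem.Dict.counter card := (PySem.Dict.counter_eq_foldl card).symm
  simp only [hc]
  rw [PySem.Dict.items_counter, List.filter_map, List.map_map]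
  simp only [Function.comp_def]
  rw [List.filter_congr (q := fun v => decide (2 ≤ PySem.List.count card v))
    (by intro x _; simp [PySem.List.count_eq])]
  simp only [List.map_id']
  rw [pvPairs]

theorem dnl_mem (card : List Int) : ∀ (l acc : List Int) (x : Int),
    (x ∈ l.foldl (fun acc v =>
      if List.count v card = 1 then acc ++ [v]
      else if v ∉ acc then acc ++ [v] else acc) acc) ↔ x ∈ acc ∨ x ∈ l := by
  intro l
  induction l with
  | nil => simp
  | cons v t ih =>
    intro acc x
    rw [List.foldl_cons]
    by_cases h1 : List.count v card = 1
    · rw [if_pos h1, ih]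
      simp [or_assoc]
    · rw [if_neg h1]
      by_cases h2 : v ∈ acc
      · rw [if_neg (by simpa using h2), ih]
        simp only [List.mem_cons]
        constructor
        · rintro (h | h)
          · exact Or.inl h
          · exact Or.inr (Or.inr h)
        · rintro (h | h | h)
          · exact Or.inl h
          · exact Or.inl (by rwa [h])
          · exact Or.inr h
      · rw [if_pos h2, ih]
        simp [or_assoc]

theorem dnl_nodup (card : List Int) : ∀ (l acc : List Int), acc.Nodup →
    (∀ v ∈ l, List.count v card = 1 → v ∉ acc) → l.Sublist card →
    (l.foldl (fun acc v =>
      if List.count v card = 1 then acc ++ [v]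
      else if v ∉ acc then acc ++ [v] else acc) acc).Nodup := by
  intro l
  induction l with
  | nil => intro acc h _ _; simpa using h
  | cons v t ih =>
    intro acc hacc hcnt hsl
    have htsl : t.Sublist card := (List.sublist_cons_self v t).trans hsl
    have hvc : 1 + List.count v t ≤ List.count v card := by
      have h := hsl.count_le v
      rw [List.count_cons_self] at h
      omega
    rw [List.foldl_cons]
    by_cases h1 : List.count v card = 1
    · have hvnot : v ∉ acc := hcnt v (by simp) h1
      rw [if_pos h1]
      refine ih (acc ++ [v]) (by simp [List.nodup_append, hacc]; exact fun a ha he => hvnot (he ▸ ha)) ?_ htsl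
      intro w hw hwc
      have hwv : w ≠ v := by
        intro he; subst he
        have h2 : 1 ≤ List.count w t := List.one_le_count_iff.mpr hw
        omega
      simp only [List.mem_append, List.mem_singleton]
      rintro (h | h)
      · exact hcnt w (by simp [hw]) hwc h
      · exact hwv h
    · rw [if_neg h1]
      by_cases h2 : v ∈ acc
      · rw [if_neg (by simpa using h2)]
        refine ih acc hacc ?_ htsl
        intro w hw hwc; exact hcnt w (by simp [hw]) hwc
      · rw [if_pos h2]
        refine ih (acc ++ [v]) (by simp [List.nodup_append, hacc]; exact fun a ha he => h2 (he ▸ ha)) ?_ htsl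
        intro w hw hwc
        have hwv : w ≠ v := by
          intro he; subst he; exact h1 hwc
        simp only [List.mem_append, List.mem_singleton]
        rintro (h | h)
        · exact hcnt w (by simp [hw]) hwc h
        · exact hwv h

theorem dnl_eq (card : List Int) :
    PySem.List.sorted
      (card.foldl (fun acc v =>
        if PySem.List.count card v = 1 then acc ++ [v]
        else if v ∉ acc then acc ++ [v] else acc) [])
      (fun x => x) false
      = PySem.List.sorted (PySem.Set.ofList card) (fun x => x) false := by
  simp only [PySem.List.count_eq]
  apply PySem.List.sorted_eq_sorted_of_perm _ _ _ (fun a b h => h)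
  apply (List.perm_ext_iff_of_nodup
    (dnl_nodup card card [] (by simp) (by simp) (List.Sublist.refl card))
    (PySem.Set.nodup_ofList card)).mpr
  intro x
  rw [dnl_mem, PySem.Set.mem_ofList]
  simp

theorem pvPairs_pairwise (card : List Int) : (pvPairs card).Pairwise (· < ·) := by
  have h1 := PySem.List.sorted_pairwise
    ((PySem.Set.ofList card).filter (fun v => decide (2 ≤ PySem.List.count card v))) (fun x => x)
  have h2 : (pvPairs card).Nodup :=
    (PySem.List.sorted_perm _ _ _).nodup_iff.mpr ((PySem.Set.nodup_ofList card).filter _)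
  exact (h1.and h2).imp (fun h => lt_of_le_of_ne h.1 h.2)

theorem chain_gap (w : List Int) (hw : w.Pairwise (· < ·)) :
    ∀ p q : Nat, p ≤ q → q < w.length → w.getD p 0 + ((q : Int) - (p : Int)) ≤ w.getD q 0 := by
  have hg := List.pairwise_iff_getElem.mp hw
  intro p q hpq
  induction q with
  | zero =>
    intro h0
    have : p = 0 := by omega
    subst this; simp
  | succ q ih =>
    intro hq1
    by_cases hp : p = q + 1
    · subst hp; simp
    · have hpq' : p ≤ q := by omega
      have hqlt : q < w.length := by omega
      have hstep : w[q] < w[q + 1] := hg q (q + 1) hqlt hq1 (by omega)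
      have := ih hpq' hqlt
      rw [List.getD_eq_getElem _ _ hqlt] at this
      rw [List.getD_eq_getElem _ _ hq1]
      push_cast
      omega

theorem strict_chain_eq_range (w : List Int) (L : Nat) (a : Int)
    (hw : w.Pairwise (· < ·)) (hlen : w.length = L) (hL : 1 ≤ L)
    (h0 : w.getD 0 0 = a) (hl : w.getD (L - 1) 0 = a + (L : Int) - 1) :
    w = PySem.List.pyRange a (a + (L : Int)) 1 := by
  apply List.ext_getElem
  · rw [PySem.List.length_pyRange_one, hlen]; omega
  · intro j hj hj2
    rw [PySem.List.getElem_pyRange_one]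
    have hjL : j < L := by omega
    have hlow := chain_gap w hw 0 j (by omega) (by omega)
    have hhigh := chain_gap w hw j (L - 1) (by omega) (by omega)
    rw [h0] at hlow
    rw [hl] at hhigh
    rw [List.getD_eq_getElem _ _ (by omega : j < w.length)] at hlow hhigh
    have hc : ((L - 1 : Nat) : Int) = (L : Int) - 1 := by omega
    rw [hc] at hhigh
    push_cast at hlow hhigh ⊢
    omega

theorem pyGet_neg_one (xs : List Int) (h : xs ≠ []) :
    PySem.List.pyGet? xs (-1) = some (xs.getD (xs.length - 1) 0) := by
  have h1 : 1 ≤ xs.length := List.length_pos_iff.mpr h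
  simp [PySem.List.pyGet?, PySem.List.pyIdx?, h1, List.getD_eq_getElem?_getD]
  rw [List.getElem?_eq_getElem (by omega)]
  simp

theorem sorted_set_last (card : List Int) (m : Int)
    (hm : PySem.List.max? card (fun x => x) = some m) :
    PySem.List.pyGet? (PySem.List.sorted (PySem.Set.ofList card) (fun x => x) false) (-1)
      = some m := by
  set s := PySem.List.sorted (PySem.Set.ofList card) (fun x => x) false with hs
  have hmem : m ∈ s := by
    rw [hs, PySem.List.mem_sorted, PySem.Set.mem_ofList]
    exact PySem.List.max?_mem hm
  have hne : s ≠ [] := List.ne_nil_of_mem hmem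
  rw [pyGet_neg_one s hne]
  have hlt : s.length - 1 < s.length := by
    have := List.length_pos_iff.mpr hne; omega
  rw [List.getD_eq_getElem _ _ hlt]
  congr 1
  have hle1 : s[s.length - 1] ≤ m := by
    apply PySem.List.max?_isMax hm
    exact (PySem.Set.mem_ofList _ _).mp
      ((PySem.List.mem_sorted _ _ _ _).mp (List.getElem_mem hlt))
  have hle2 : m ≤ s[s.length - 1] := by
    obtain ⟨k, hk, hkm⟩ := List.getElem_of_mem hmem
    calc m = s[k] := hkm.symm
    _ ≤ s[s.length - 1] := by
      have := PySem.List.key_sorted_getElem_mono (xs := PySem.Set.ofList card)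
        (key := fun x => x) (p := k) (q := s.length - 1) (by omega)
      simp only [← hs] at this
      exact this (by rw [hs] at hlt; exact hlt)
  omega

theorem pyGet_zero (xs : List Int) (h : xs ≠ []) :
    PySem.List.pyGet? xs 0 = some (xs.getD 0 0) := by
  have h1 : 0 < xs.length := List.length_pos_iff.mpr h
  simp [PySem.List.pyGet?, PySem.List.pyIdx?, h1]

theorem pvALoop_unfold (cards01 cards02 : List Int) (length index : Nat)
    (acc : List (List Int)) :
    pvALoop cards01 cards02 length index acc =
      if index + length ≤ cards02.length then
        match PySem.List.pyGet? (PySem.List.slice cards02 (some (index : Int))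
            (some ((index : Int) + (length : Int)))) (-1),
          PySem.List.pyGet? cards01 (-1) with
        | some wl, some c1l =>
            pvALoop cards01 cards02 length (index + 1)
              (if wl ≠ 15 ∧ c1l < wl then
                match PySem.List.pyGet? (PySem.List.slice cards02 (some (index : Int))
                    (some ((index : Int) + (length : Int)))) 0 with
                | some w0 =>
                    if w0 + ((PySem.List.slice cards02 (some (index : Int))
                        (some ((index : Int) + (length : Int)))).length : Int) - 1 = wl then
                      acc ++ [(PySem.List.slice cards02 (some (index : Int))
                          (some ((index : Int) + (length : Int)))) ++
                        (PySem.List.slice cards02 (some (index : Int))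
                          (some ((index : Int) + (length : Int))))]
                    else acc
                | none => acc
              else acc)
        | _, _ => acc
      else acc := by
  rw [pvALoop]
  split <;> rfl

theorem loop_eq (c01 P : List Int) (L : Nat) (top : Int)
    (hP : P.Pairwise (· < ·)) (hL : 1 ≤ L)
    (hlast : PySem.List.pyGet? c01 (-1) = some top) :
    ∀ (i : Nat) (acc : List (List Int)),
      pvALoop c01 P L i acc
        = (PySem.List.pyRange (i : Int) ((P.length : Int) - (L : Int) + 1) 1).foldl
            (pvBStep P L top) acc := by
  have key : ∀ (k i : Nat) (acc : List (List Int)), P.length + 1 - i ≤ k →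
      pvALoop c01 P L i acc
        = (PySem.List.pyRange (i : Int) ((P.length : Int) - (L : Int) + 1) 1).foldl
            (pvBStep P L top) acc := by
    intro k
    induction k with
    | zero =>
      intro i acc hk
      rw [pvALoop, dif_neg (by omega), PySem.List.pyRange_one_eq_nil (by omega)]
      rfl
    | succ k ih =>
      intro i acc hk
      by_cases hcase : i + L ≤ P.length
      · rw [pvALoop_unfold, if_pos hcase]
        set itm := PySem.List.slice P (some (i : Int)) (some ((i : Int) + (L : Int))) with hitm
        have hslice : itm = List.take L (List.drop i P) := by
          rw [hitm, PySem.List.slice_of_nonneg P (by omega) (by omega) (by omega) (by omega)]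
          congr 1
          omega
        have hitmlen : itm.length = L := by
          rw [hslice]; simp; omega
        have hitmne : itm ≠ [] := by
          intro he; rw [he] at hitmlen; simp at hitmlen; omega
        have hget : ∀ j : Nat, j < L → itm.getD j 0 = P.getD (i + j) 0 := by
          intro j hj
          have hjlen : j < itm.length := by omega
          have hij : i + j < P.length := by omega
          rw [List.getD_eq_getElem _ _ hjlen, List.getD_eq_getElem _ _ hij,
            List.getElem_of_eq hslice]
          simp [List.getElem_take, List.getElem_drop]
        rw [pyGet_neg_one itm hitmne, hlast, pyGet_zero itm hitmne]
        set wl := itm.getD (itm.length - 1) 0 with hwl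
        have hwlP : wl = P.getD (i + L - 1) 0 := by
          rw [hwl, hitmlen, hget (L - 1) (by omega)]
          congr 2
          omega
        have hrange_cons : PySem.List.pyRange (i : Int) ((P.length : Int) - (L : Int) + 1) 1
            = (i : Int) :: PySem.List.pyRange ((i : Int) + 1) ((P.length : Int) - (L : Int) + 1) 1 :=
          PySem.List.pyRange_one_cons (by omega)
        rw [hrange_cons, List.foldl_cons]
        show pvALoop c01 P L (i + 1)
            (if wl ≠ 15 ∧ top < wl then
              (if itm.getD 0 0 + (itm.length : Int) - 1 = wl then acc ++ [itm ++ itm] else acc)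
            else acc) = _
        have hbstep : pvBStep P L top acc (i : Int)
            = if wl ≠ 15 ∧ top < wl then
                (if itm.getD 0 0 + (itm.length : Int) - 1 = wl then acc ++ [itm ++ itm] else acc)
              else acc := by
          simp only [pvBStep]
          have e1 : PySem.List.pyGetD P ((i : Int) + (L : Int) - 1) 0 = wl := by
            rw [PySem.List.pyGetD_of_nonneg P 0 (by omega), hwlP]
            congr 1
            omega
          have e2 : PySem.List.pyGetD P (i : Int) 0 = itm.getD 0 0 := by
            rw [PySem.List.pyGetD_of_nonneg P 0 (by omega), hget 0 (by omega)]
            simp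
          rw [e1, e2]
          by_cases c1 : wl = 15
          · simp [c1]
          · by_cases c2 : top < wl
            · by_cases c3 : itm.getD 0 0 + (itm.length : Int) - 1 = wl
              · rw [if_pos ⟨c1, c2, by rw [hitmlen] at c3; omega⟩, if_pos ⟨c1, c2⟩, if_pos c3]
                have hpw : itm.Pairwise (· < ·) := by
                  rw [hslice]
                  exact hP.sublist ((List.take_sublist _ _).trans (List.drop_sublist _ _))
                have hitmrange : itm
                    = PySem.List.pyRange (itm.getD 0 0) (itm.getD 0 0 + (L : Int)) 1 := by
                  apply strict_chain_eq_range itm L (itm.getD 0 0) hpw hitmlen hL rfl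
                  have hcc : itm.getD (L - 1) 0 = wl := by rw [hwl, hitmlen]
                  rw [hitmlen] at c3
                  omega
                have hb1 : wl - (L : Int) + 1 = itm.getD 0 0 := by
                  rw [hitmlen] at c3; omega
                have hb2 : wl + 1 = itm.getD 0 0 + (L : Int) := by
                  rw [hitmlen] at c3; omega
                rw [hb1, hb2, ← hitmrange]
              · rw [if_neg (fun h => (by rw [hitmlen] at c3; omega : ¬ wl - itm.getD 0 0 = (L : Int) - 1) h.2.2),
                  if_pos ⟨c1, c2⟩, if_neg c3]
            · rw [if_neg (fun h => c2 h.2.1), if_neg (fun h => c2 h.2)]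
        rw [← hbstep]
        exact ih (i + 1) _ (by omega)
      · rw [pvALoop, dif_neg hcase, PySem.List.pyRange_one_eq_nil (by omega)]
        rfl
  intro i acc
  exact key (P.length + 1 - i) i acc (le_refl _)

-- ===== B-side: the run loop equals the window fold =====

theorem pvRunEnd_lt (pairs : List Int) (j : Nat) (h : j < pairs.length) :
    pvRunEnd pairs j < pairs.length := by
  rw [pvRunEnd]
  split
  · exact pvRunEnd_lt pairs (j + 1) (by omega)
  · exact h
termination_by pairs.length - j
decreasing_by omega

theorem pvRunEnd_consec (pairs : List Int) (j : Nat) :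
    ∀ k, j ≤ k → k < pvRunEnd pairs j → pairs.getD (k + 1) 0 = pairs.getD k 0 + 1 := by
  rw [pvRunEnd]
  split
  · rename_i h
    intro k hk1 hk2
    rcases Nat.eq_or_lt_of_le hk1 with he | hl
    · rw [← he]; exact h.2
    · exact pvRunEnd_consec pairs (j + 1) k hl hk2
  · intro k hk1 hk2; omega
termination_by pairs.length - j
decreasing_by omega

theorem pvRunEnd_stop (pairs : List Int) (j : Nat) :
    ¬ (pvRunEnd pairs j + 1 < pairs.length ∧
        pairs.getD (pvRunEnd pairs j + 1) 0 = pairs.getD (pvRunEnd pairs j) 0 + 1) := by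
  rw [pvRunEnd]
  split
  · exact pvRunEnd_stop pairs (j + 1)
  · rename_i h; exact h
termination_by pairs.length - j
decreasing_by omega

-- within a consecutive run, values are linear in the index
theorem run_linear (pairs : List Int) (i R : Nat)
    (hc : ∀ k, i ≤ k → k < R → pairs.getD (k + 1) 0 = pairs.getD k 0 + 1) :
    ∀ q, i ≤ q → q ≤ R → pairs.getD q 0 = pairs.getD i 0 + ((q : Int) - (i : Int)) := by
  intro q
  induction q with
  | zero => intro h1 _; have : i = 0 := by omega
            subst this; simp
  | succ q ih =>
    intro h1 h2
    rcases Nat.eq_or_lt_of_le h1 with he | hl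
    · rw [← he]; simp
    · have := ih (by omega) (by omega)
      rw [hc q (by omega) (by omega), this]
      push_cast
      ring

theorem pvEmit_empty (L : Nat) (top lo hi : Int) (res : List (List Int)) (h : hi < lo) :
    pvEmit L top lo hi res = res := by
  rw [pvEmit, PySem.List.pyRange_one_eq_nil (by omega)]
  rfl

-- core: folding pvBStep over the window starts inside one maximal run [i..R] equals pvEmit for the run
theorem run_fold (pairs : List Int) (L : Nat) (top : Int)
    (hP : pairs.Pairwise (· < ·)) (hL : 1 ≤ L) (i R : Nat) (hiR : i ≤ R)
    (hRn : R < pairs.length)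
    (hc : ∀ k, i ≤ k → k < R → pairs.getD (k + 1) 0 = pairs.getD k 0 + 1)
    (hstop : ¬ (R + 1 < pairs.length ∧ pairs.getD (R + 1) 0 = pairs.getD R 0 + 1)) :
    ∀ (s : Nat) (res : List (List Int)), i ≤ s → s ≤ R + 1 →
      (PySem.List.pyRange (s : Int)
          (min ((R : Int) + 1) ((pairs.length : Int) - (L : Int) + 1)) 1).foldl
        (pvBStep pairs L top) res
      = pvEmit L top (pairs.getD i 0 + ((s : Int) - (i : Int)) + (L : Int) - 1)
          (pairs.getD R 0) res := by
  have hR := run_linear pairs i R hc R hiR (le_refl R)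
  have key : ∀ (fuel s : Nat) (res : List (List Int)), R + 1 - s ≤ fuel → i ≤ s → s ≤ R + 1 →
      (PySem.List.pyRange (s : Int)
          (min ((R : Int) + 1) ((pairs.length : Int) - (L : Int) + 1)) 1).foldl
        (pvBStep pairs L top) res
      = pvEmit L top (pairs.getD i 0 + ((s : Int) - (i : Int)) + (L : Int) - 1)
          (pairs.getD R 0) res := by
    intro fuel
    induction fuel with
    | zero =>
      intro s res hf h1 h2
      have hs : s = R + 1 := by omega
      subst hs
      rw [PySem.List.pyRange_one_eq_nil (by omega), List.foldl_nil,
        pvEmit_empty _ _ _ _ _ (by push_cast; omega)]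
    | succ fuel ih =>
      intro s res hf h1 h2
      by_cases hsR : s = R + 1
      · subst hsR
        rw [PySem.List.pyRange_one_eq_nil (by omega), List.foldl_nil,
          pvEmit_empty _ _ _ _ _ (by push_cast; omega)]
      · have hsR' : s ≤ R := by omega
        have hlin_s : pairs.getD s 0 = pairs.getD i 0 + ((s : Int) - (i : Int)) :=
          run_linear pairs i R hc s h1 hsR'
        by_cases hwin : s + L ≤ R + 1
        · -- window lies inside the run
          have hsn : s + L ≤ pairs.length := by omega
          have hlin_w : pairs.getD (s + L - 1) 0
              = pairs.getD i 0 + (((s + L - 1 : Nat) : Int) - (i : Int)) :=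
            run_linear pairs i R hc (s + L - 1) (by omega) (by omega)
          have e1 : PySem.List.pyGetD pairs ((s : Int) + (L : Int) - 1) 0
              = pairs.getD (s + L - 1) 0 := by
            rw [PySem.List.pyGetD_of_nonneg pairs 0 (by omega)]
            congr 1
            omega
          have e2 : PySem.List.pyGetD pairs (s : Int) 0 = pairs.getD s 0 := by
            simp
          set last := pairs.getD i 0 + ((s : Int) - (i : Int)) + (L : Int) - 1 with hlastdef
          have hlast_eq : pairs.getD (s + L - 1) 0 = last := by
            rw [hlin_w, hlastdef]
            push_cast [Nat.cast_sub (by omega : 1 ≤ s + L)]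
            ring
          have hbstep : pvBStep pairs L top res (s : Int)
              = if last ≠ 15 ∧ top < last then
                  res ++ [(PySem.List.pyRange (last - (L : Int) + 1) (last + 1) 1)
                    ++ (PySem.List.pyRange (last - (L : Int) + 1) (last + 1) 1)]
                else res := by
            simp only [pvBStep, e1, e2, hlast_eq, hlin_s]
            by_cases c1 : last = 15
            · simp [c1]
            · by_cases c2 : top < last
              · rw [if_pos ⟨c1, c2, by rw [hlastdef]; ring⟩, if_pos ⟨c1, c2⟩]
              · rw [if_neg (fun h => c2 h.2.1), if_neg (fun h => c2 h.2)]
          have hhi : last ≤ pairs.getD R 0 := by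
            rw [hR, hlastdef]
            push_cast
            omega
          have hcons : PySem.List.pyRange (s : Int)
                (min ((R : Int) + 1) ((pairs.length : Int) - (L : Int) + 1)) 1
              = (s : Int) :: PySem.List.pyRange ((s : Int) + 1)
                  (min ((R : Int) + 1) ((pairs.length : Int) - (L : Int) + 1)) 1 :=
            PySem.List.pyRange_one_cons (by push_cast; omega)
          rw [hcons, List.foldl_cons]
          have hstep := ih (s + 1) (pvBStep pairs L top res (s : Int)) (by omega) (by omega) (by omega)
          have hcast : (((s + 1 : Nat)) : Int) = (s : Int) + 1 := by push_cast; ring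
          rw [hcast] at hstep
          rw [hstep]
          -- absorb one emitted window into pvEmit
          rw [hbstep]
          by_cases c2 : top < last
          · have hmax1 : max last (top + 1) = last := by omega
            have hmax2 : max (pairs.getD i 0 + ((s : Int) + 1 - (i : Int)) + (L : Int) - 1) (top + 1)
                = last + 1 := by omega
            rw [pvEmit, pvEmit]
            rw [hmax1, hmax2,
              PySem.List.pyRange_one_cons (by omega : last < pairs.getD R 0 + 1), List.foldl_cons]
            by_cases c1 : last = 15
            · rw [if_neg (fun h => h.1 c1), if_neg (by simpa using c1)]
            · rw [if_pos ⟨c1, c2⟩, if_pos c1]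
          · have hmax1 : max last (top + 1) = top + 1 := by omega
            have hmax2 : max (pairs.getD i 0 + ((s : Int) + 1 - (i : Int)) + (L : Int) - 1) (top + 1)
                = top + 1 := by omega
            rw [if_neg (fun h => c2 h.2), pvEmit, pvEmit]
            rw [hmax1, hmax2]
        · -- trailing starts: the window would cross the gap after the run, pvBStep is a no-op
          have hemit : pvEmit L top (pairs.getD i 0 + ((s : Int) - (i : Int)) + (L : Int) - 1)
              (pairs.getD R 0) res = res :=
            pvEmit_empty _ _ _ _ _ (by rw [hR]; push_cast; omega)
          by_cases hmin : (s : Int) < min ((R : Int) + 1) ((pairs.length : Int) - (L : Int) + 1)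
          · have hsn : s + L ≤ pairs.length := by omega
            have hRlt : R + 1 < pairs.length := by omega
            have hgap1 : pairs.getD R 0 + 1 ≤ pairs.getD (R + 1) 0 := by
              have := chain_gap pairs hP R (R + 1) (by omega) hRlt
              push_cast at this
              omega
            have hgap : pairs.getD R 0 + 2 ≤ pairs.getD (R + 1) 0 := by
              rcases Int.lt_or_lt_of_ne (fun he => hstop ⟨hRlt, he.symm⟩) with h | h <;> omega
            have hfar : pairs.getD (R + 1) 0 + (((s + L - 1 : Nat) : Int) - ((R + 1 : Nat) : Int))
                ≤ pairs.getD (s + L - 1) 0 :=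
              chain_gap pairs hP (R + 1) (s + L - 1) (by omega) (by omega)
            have e1 : PySem.List.pyGetD pairs ((s : Int) + (L : Int) - 1) 0
                = pairs.getD (s + L - 1) 0 := by
              rw [PySem.List.pyGetD_of_nonneg pairs 0 (by omega)]
              congr 1
              omega
            have e2 : PySem.List.pyGetD pairs (s : Int) 0 = pairs.getD s 0 := by
              simp
            have hnoop : pvBStep pairs L top res (s : Int) = res := by
              simp only [pvBStep, e1, e2]
              rw [if_neg]
              intro h
              have h3 := h.2.2
              rw [hlin_s] at h3
              omega
            rw [PySem.List.pyRange_one_cons hmin, List.foldl_cons, hnoop]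
            have hstep := ih (s + 1) res (by omega) (by omega) (by omega)
            have hcast : (((s + 1 : Nat)) : Int) = (s : Int) + 1 := by push_cast; ring
            rw [hcast] at hstep
            rw [hstep, hemit,
              pvEmit_empty _ _ _ _ _ (by rw [hR]; push_cast; omega)]
          · rw [PySem.List.pyRange_one_eq_nil (by omega), List.foldl_nil, hemit]
  intro s res h1 h2
  exact key (R + 1 - s) s res (le_refl _) h1 h2

theorem outer_eq (pairs : List Int) (L : Nat) (top : Int)
    (hP : pairs.Pairwise (· < ·)) (hL : 1 ≤ L) :
    ∀ (i : Nat) (res : List (List Int)),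
      pvOuter pairs L top i res
        = (PySem.List.pyRange (i : Int) ((pairs.length : Int) - (L : Int) + 1) 1).foldl
            (pvBStep pairs L top) res := by
  have key : ∀ (fuel i : Nat) (res : List (List Int)), pairs.length - i ≤ fuel →
      pvOuter pairs L top i res
        = (PySem.List.pyRange (i : Int) ((pairs.length : Int) - (L : Int) + 1) 1).foldl
            (pvBStep pairs L top) res := by
    intro fuel
    induction fuel with
    | zero =>
      intro i res hf
      rw [pvOuter, dif_neg (by omega), PySem.List.pyRange_one_eq_nil (by omega), List.foldl_nil]
    | succ fuel ih =>
      intro i res hf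
      by_cases hi : i < pairs.length
      · rw [pvOuter, dif_pos hi]
        set R := pvRunEnd pairs i with hRdef
        have hiR : i ≤ R := pvRunEnd_ge pairs i
        have hRn : R < pairs.length := pvRunEnd_lt pairs i hi
        have hrun := run_fold pairs L top hP hL i R hiR hRn
          (fun k hk1 hk2 => pvRunEnd_consec pairs i k hk1 hk2)
          (pvRunEnd_stop pairs i) i res (le_refl i) (by omega)
        have hlo : pairs.getD i 0 + ((i : Int) - (i : Int)) + (L : Int) - 1
            = pairs.getD i 0 + (L : Int) - 1 := by ring
        rw [hlo] at hrun
        have hnext := ih (R + 1) (pvEmit L top (pairs.getD i 0 + (L : Int) - 1)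
          (pairs.getD R 0) res) (by omega)
        have hcast : (((R + 1 : Nat)) : Int) = (R : Int) + 1 := by push_cast; ring
        rw [hcast] at hnext
        rw [hnext, ← hrun]
        by_cases hsplit : (R : Int) + 1 ≤ (pairs.length : Int) - (L : Int) + 1
        · have hmin : min ((R : Int) + 1) ((pairs.length : Int) - (L : Int) + 1)
              = (R : Int) + 1 := by omega
          rw [hmin, ← List.foldl_append,
            ← PySem.List.pyRange_one_append (i : Int) ((R : Int) + 1)
              ((pairs.length : Int) - (L : Int) + 1) (by push_cast; omega) hsplit]
        · have hmin : min ((R : Int) + 1) ((pairs.length : Int) - (L : Int) + 1)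
              = (pairs.length : Int) - (L : Int) + 1 := by omega
          have hnil : PySem.List.pyRange ((R : Int) + 1)
              ((pairs.length : Int) - (L : Int) + 1) 1 = [] :=
            PySem.List.pyRange_one_eq_nil (by omega)
          rw [hmin, hnil, List.foldl_nil]
      · rw [pvOuter, dif_neg hi, PySem.List.pyRange_one_eq_nil (by omega), List.foldl_nil]
  intro i res
  exact key (pairs.length - i) i res (le_refl _)

theorem main_eq (card1 card2 : List Int) (room_info : Int) (hpre : card1 ≠ []) :
    find_continuous_double card1 card2 room_info
      = find_continuous_double_alt card1 card2 room_info := by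
  obtain ⟨m, hm⟩ : ∃ m, PySem.List.max? card1 (fun x => x) = some m := by
    cases hmx : PySem.List.max? card1 (fun x => x) with
    | none => exact absurd ((PySem.List.max?_eq_none_iff _ _).mp hmx) hpre
    | some m => exact ⟨m, rfl⟩
  simp only [find_continuous_double, find_continuous_double_alt, pvFindDoubleAll,
    pvDistinctNumberList, fda_eq, dnl_eq, bpairs_eq, hm]
  have hL1 : 1 ≤ (PySem.Set.ofList card1).length := by
    have hmem : card1.headI ∈ PySem.Set.ofList card1 := by
      rw [PySem.Set.mem_ofList]
      exact List.head!_mem_self hpre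
    have := List.length_pos_iff.mpr (List.ne_nil_of_mem hmem)
    omega
  set L := (PySem.Set.ofList card1).length with hLdef
  set c01 := PySem.List.sorted (PySem.Set.ofList card1) (fun x => x) false with hc01
  have hc01len : c01.length = L := PySem.List.length_sorted _ _ _
  have hlast : PySem.List.pyGet? c01 (-1) = some m := sorted_set_last card1 m hm
  set n := (pvPairs card2).length with hn
  rw [hc01len, outer_eq (pvPairs card2) L m (pvPairs_pairwise card2) hL1 0 []]
  by_cases hsz : n < L
  · rw [if_pos hsz, PySem.List.pyRange_one_eq_nil (by omega)]
    rfl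
  · rw [if_neg hsz,
      loop_eq c01 (pvPairs card2) L m (pvPairs_pairwise card2) hL1 hlast 0 []]

-- ===== VERDICT (by name: the statement is the Claim_ definition above) =====
theorem find_continuous_double_spec : Claim_equal_find_continuous_double := by
  intro card1 card2 room_info _ hpre
  exact main_eq card1 card2 room_info hpre
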